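-- pv_equiv track=rewrite | github.com/hyohyo12/python_algorithm | baekjoon/12904.py | can_be_s
-- ===== SOURCE A (Python) =====
-- def can_be_s(s:list[str],t:list[str])->bool:
--     while len(s) != len(t):
--         tmp = t.pop()
--         if tmp == 'B':
--             t = t[::-1]
--     if s == t:
--         return True
--     return False
-- ===== SOURCE B (Python) =====
-- def can_be_s(s, t):
--     # Two pointers into t with a direction flag: no physical reversal, no copying per pop.
--     lo, hi = 0, len(t)
--     rev = False
--     while hi - lo > len(s):
--         if rev:
--             c = t[lo]
--             lo += 1
--         else:
--             hi -= 1
--             c = t[hi]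
--         if c == 'B':
--             rev = not rev
--     u = t[lo:hi]
--     if rev:
--         u = u[::-1]
--     return s == u
-- ===== Notes on version B (the rewrite author's own statement) =====
-- stated objective: alternative
-- what changed: A physically pops from the list and rebuilds a reversed copy on every 'B'; B never touches t: it moves two index pointers over it with a direction flag and materialises/orients the remaining window only once at the end.
import Mathlib
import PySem

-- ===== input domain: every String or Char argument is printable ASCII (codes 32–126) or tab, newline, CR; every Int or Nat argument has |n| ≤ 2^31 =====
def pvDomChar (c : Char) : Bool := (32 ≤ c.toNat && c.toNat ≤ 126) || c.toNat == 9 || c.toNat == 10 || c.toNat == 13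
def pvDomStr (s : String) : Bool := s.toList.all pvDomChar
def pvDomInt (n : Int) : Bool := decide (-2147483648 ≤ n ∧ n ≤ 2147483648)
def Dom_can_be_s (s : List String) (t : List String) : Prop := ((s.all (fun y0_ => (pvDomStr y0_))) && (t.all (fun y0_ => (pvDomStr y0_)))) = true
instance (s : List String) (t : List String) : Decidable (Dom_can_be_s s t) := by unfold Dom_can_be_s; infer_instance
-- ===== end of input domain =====

-- B replaces A's physical pop-and-reverse loop by two pointers into t with a direction flag;
-- return-value equivalence only — A mutates the caller's t via pop() until the first reversal.

-- ===== PORT A =====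
-- "while len(s) != len(t): tmp = t.pop(); if tmp == 'B': t = t[::-1]" as recursion on t
def can_be_s (s : List String) (t : List String) : Bool :=
  if s.length = t.length then s == t
  else
    match t with
    | [] => false      -- Python: t.pop() raises IndexError here; excluded by Pre_
    | x :: xs =>
      if (x :: xs).getLast (by simp) = "B" then can_be_s s (x :: xs).dropLast.reverse
      else can_be_s s (x :: xs).dropLast
termination_by t.length
decreasing_by all_goals simp [List.length_dropLast]

-- ===== PORT B =====
-- the "while hi - lo > len(s)" loop of Source B (the one-use temp c is inlined);
-- t[lo] / t[hi] are always in range on the loop's states, so .getD "" is exact there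
def altLoop (t : List String) (slen : Nat) (lo hi : Nat) (rev : Bool) : Nat × Nat × Bool :=
  if slen < hi - lo then
    if rev then
      altLoop t slen (lo + 1) hi
        (if (PySem.List.pyGet? t (lo : Int)).getD "" = "B" then !rev else rev)
    else
      altLoop t slen lo (hi - 1)
        (if (PySem.List.pyGet? t ((hi : Int) - 1)).getD "" = "B" then !rev else rev)
  else (lo, hi, rev)
termination_by hi - lo

def can_be_s_alt (s : List String) (t : List String) : Bool :=
  let r := altLoop t s.length 0 t.length false
  let u := PySem.List.slice t (some (r.1 : Int)) (some (r.2.1 : Int))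
  let u := if r.2.2 then u.reverse else u
  s == u

-- ===== PRECONDITION & SPEC =====
-- Pre_ excludes t shorter than s, where A's t.pop() raises IndexError on the emptied list.
def Pre_can_be_s (s : List String) (t : List String) : Prop := s.length ≤ t.length
instance (s : List String) (t : List String) : Decidable (Pre_can_be_s s t) := by unfold Pre_can_be_s; infer_instance
def pvWitness_can_be_s : List String × List String := (["a"], ["a", "B"])

def Spec_can_be_s (s : List String) (t : List String) (out : Bool) : Prop := out = can_be_s_alt s t
instance (s : List String) (t : List String) (out : Bool) : Decidable (Spec_can_be_s s t out) := by unfold Spec_can_be_s; infer_instance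

-- ===== CLAIM (what is proved, stated in full; the proofs are below) =====
def Claim_equal_can_be_s : Prop := ∀ (s : List String) (t : List String), Dom_can_be_s s t → Pre_can_be_s s t → Spec_can_be_s s t (can_be_s s t)

-- ===== LEMMAS AND PROOFS =====

-- the list A's loop is currently working on, expressed through B's state (t0, lo, hi, rev)
def pvView (t0 : List String) (lo hi : Nat) (rev : Bool) : List String :=
  if rev then ((t0.drop lo).take (hi - lo)).reverse else (t0.drop lo).take (hi - lo)

lemma pvView_true (t0 : List String) (lo hi : Nat) :
    pvView t0 lo hi true = ((t0.drop lo).take (hi - lo)).reverse := rfl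

lemma pvView_false (t0 : List String) (lo hi : Nat) :
    pvView t0 lo hi false = (t0.drop lo).take (hi - lo) := rfl

lemma pvView_length (t0 : List String) (lo hi : Nat) (hhi : hi ≤ t0.length)
    (rev : Bool) : (pvView t0 lo hi rev).length = hi - lo := by
  unfold pvView
  cases rev <;> simp <;> omega

lemma can_be_s_cons (s : List String) (x : String) (xs : List String)
    (hne : ¬ s.length = (x :: xs).length) :
    can_be_s s (x :: xs) =
      (if (x :: xs).getLast (by simp) = "B" then can_be_s s (x :: xs).dropLast.reverse
       else can_be_s s (x :: xs).dropLast) := by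
  rw [can_be_s.eq_def, if_neg hne]

lemma main_invariant (s t0 : List String) :
    ∀ (lo hi : Nat) (rev : Bool), lo ≤ hi → hi ≤ t0.length → s.length ≤ hi - lo →
    can_be_s s (pvView t0 lo hi rev) =
      (s == pvView t0 (altLoop t0 s.length lo hi rev).1
        (altLoop t0 s.length lo hi rev).2.1 (altLoop t0 s.length lo hi rev).2.2) := by
  intro lo hi rev
  induction lo, hi, rev using altLoop.induct (t := t0) (slen := s.length) with
  | case1 lo hi h ih =>
    -- rev = true : A pops the window's left end
    intro hlo hhi hs
    have hlt : lo < t0.length := by omega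
    have hsome : t0[lo]? = some t0[lo] := List.getElem?_eq_getElem hlt
    have hcv : (PySem.List.pyGet? t0 (lo : Int)).getD "" = t0[lo] := by
      simp [hsome]
    rw [hcv] at ih
    have hvlast : (pvView t0 lo hi true).getLast? = some t0[lo] := by
      rw [pvView_true, List.getLast?_reverse, List.head?_eq_getElem?,
        List.getElem?_take_of_lt (by omega), List.getElem?_drop]
      simp [hsome]
    have hvdrop : (pvView t0 lo hi true).dropLast = pvView t0 (lo + 1) hi true := by
      rw [pvView_true, List.dropLast_reverse, pvView_true]
      congr 1
      rw [← List.drop_one, List.drop_take, List.drop_drop]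
      congr 1
    have hlen : (pvView t0 lo hi true).length = hi - lo := pvView_length t0 lo hi hhi true
    obtain ⟨y, ys, hvy⟩ : ∃ y ys, pvView t0 lo hi true = y :: ys := by
      rcases hE : pvView t0 lo hi true with _ | ⟨y, ys⟩
      · rw [hE] at hlen; simp at hlen; omega
      · exact ⟨y, ys, rfl⟩
    have hlastc : (y :: ys).getLast (by simp) = t0[lo] := by
      rw [hvy, List.getLast?_eq_some_getLast (by simp)] at hvlast
      exact Option.some.inj hvlast
    have hdropc : (y :: ys).dropLast = pvView t0 (lo + 1) hi true := by
      rw [← hvy]; exact hvdrop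
    rw [hvy, can_be_s_cons s y ys (by rw [← hvy, hlen]; omega), hlastc, hdropc]
    rw [altLoop]
    simp only [if_pos h, if_true, hcv]
    by_cases hB : t0[lo] = "B"
    · simp only [dif_pos hB, Bool.not_true] at ih
      simp only [if_pos hB, Bool.not_true]
      rw [show (pvView t0 (lo + 1) hi true).reverse = pvView t0 (lo + 1) hi false by
        rw [pvView_true, pvView_false, List.reverse_reverse]]
      exact ih (by omega) hhi (by omega)
    · simp only [dif_neg hB] at ih
      simp only [if_neg hB]
      exact ih (by omega) hhi (by omega)
  | case2 lo hi rev h hrev ih =>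
    -- rev = false : A pops the window's right end
    intro hlo hhi hs
    have hrf : rev = false := by simpa using hrev
    subst hrf
    have hlt : hi - 1 < t0.length := by omega
    have hsome : t0[hi - 1]? = some t0[hi - 1] := List.getElem?_eq_getElem hlt
    have hcast : ((hi : Int) - 1) = ((hi - 1 : Nat) : Int) := by omega
    have hcv : (PySem.List.pyGet? t0 ((hi : Int) - 1)).getD "" = t0[hi - 1] := by
      rw [hcast]
      simp [hsome]
    rw [hcv] at ih
    have hvlast : (pvView t0 lo hi false).getLast? = some t0[hi - 1] := by
      rw [pvView_false, List.getLast?_eq_getElem?]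
      have hlen' : ((t0.drop lo).take (hi - lo)).length = hi - lo := by simp; omega
      rw [hlen', List.getElem?_take_of_lt (by omega), List.getElem?_drop,
        show lo + (hi - lo - 1) = hi - 1 by omega]
      exact hsome
    have hvdrop : (pvView t0 lo hi false).dropLast = pvView t0 lo (hi - 1) false := by
      rw [pvView_false, pvView_false, List.dropLast_eq_take, List.take_take]
      congr 1
      simp
      omega
    have hlen : (pvView t0 lo hi false).length = hi - lo := pvView_length t0 lo hi hhi false
    obtain ⟨y, ys, hvy⟩ : ∃ y ys, pvView t0 lo hi false = y :: ys := by
      rcases hE : pvView t0 lo hi false with _ | ⟨y, ys⟩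
      · rw [hE] at hlen; simp at hlen; omega
      · exact ⟨y, ys, rfl⟩
    have hlastc : (y :: ys).getLast (by simp) = t0[hi - 1] := by
      rw [hvy, List.getLast?_eq_some_getLast (by simp)] at hvlast
      exact Option.some.inj hvlast
    have hdropc : (y :: ys).dropLast = pvView t0 lo (hi - 1) false := by
      rw [← hvy]; exact hvdrop
    rw [hvy, can_be_s_cons s y ys (by rw [← hvy, hlen]; omega), hlastc, hdropc]
    rw [altLoop]
    simp only [if_pos h, Bool.false_eq_true, if_false, hcv]
    by_cases hB : t0[hi - 1] = "B"
    · simp only [dif_pos hB, Bool.not_false] at ih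
      simp only [if_pos hB, Bool.not_false]
      rw [show (pvView t0 lo (hi - 1) false).reverse = pvView t0 lo (hi - 1) true by
        rw [pvView_true, pvView_false]]
      exact ih (by omega) (by omega) (by omega)
    · simp only [dif_neg hB] at ih
      simp only [if_neg hB]
      exact ih (by omega) (by omega) (by omega)
  | case3 lo hi rev h =>
    intro hlo hhi hs
    rw [altLoop]
    simp only [if_neg h]
    rw [can_be_s.eq_def]
    have hlen : (pvView t0 lo hi rev).length = hi - lo := pvView_length t0 lo hi hhi rev
    have heq : s.length = (pvView t0 lo hi rev).length := by omega
    simp [heq]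

-- ===== VERDICT (by name: the statement is the Claim_ definition above) =====
theorem can_be_s_spec : Claim_equal_can_be_s := by
  intro s t _ hpre
  unfold Pre_can_be_s at hpre
  unfold Spec_can_be_s can_be_s_alt
  have h := main_invariant s t 0 t.length false (by omega) le_rfl (by omega)
  have hv : pvView t 0 t.length false = t := by
    rw [pvView_false]; simp
  rw [hv] at h
  rw [h]
  simp only [PySem.List.slice_natCast, pvView]
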